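-- pv_equiv track=rewrite | github.com/analyzr-ai/analyzr-sdk-python | analyzrclient/utils.py | fref_to_fref_expanded
-- ===== SOURCE A (Python) =====
-- def fref_to_fref_expanded(fref, xref):
--     """
--     Convert <fref> to expanded field names (using dummy variable convention)
--
--     :param fref:
--     :param xref:
--     :return fref_exp:
--     """
--     fref_exp = {'forward': {}, 'reverse': {}}
--     for col in fref['forward'].keys():
--         key = fref['forward'][col]
--         if col in xref.keys():
--             # col is categorical, need to expand it
--             for category in xref[col]['forward'].keys():
--                 col_exp = '{}_{}'.format(col, category)
--                 key_exp = '{}_{}'.format(key, xref[col]['forward'][category])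
--                 fref_exp['forward'][col_exp] = key_exp
--                 fref_exp['reverse'][key_exp] = col_exp
--         else:
--             # col is not categorical
--             fref_exp['forward'][col] = key
--             fref_exp['reverse'][key] = col
--     return fref_exp
-- ===== SOURCE B (Python) =====
-- def fref_to_fref_expanded(fref, xref):
--     def pairs(items):
--         out = []
--         if items:
--             (col, key), rest = items[0], items[1:]
--             if col in xref:
--                 out = [('{}_{}'.format(col, c), '{}_{}'.format(key, d))
--                        for c, d in xref[col]['forward'].items()]
--             else:
--                 out = [(col, key)]
--             out += pairs(rest)
--         return out
--     ps = pairs(list(fref['forward'].items()))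
--     return {'forward': dict(ps), 'reverse': dict((v, k) for k, v in ps)}
-- ===== Notes on version B (the rewrite author's own statement) =====
-- stated objective: alternative
-- what changed: Instead of A's imperative nested loops inserting into two dicts in lockstep, B recursively computes a single flat (col_exp, key_exp) association list as an intermediate value and then materialises both maps from it with the dict() constructor (forward from the pairs, reverse from the swapped pairs); last-wins dict construction makes this equal to A even on colliding expanded names.
import Mathlib
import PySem

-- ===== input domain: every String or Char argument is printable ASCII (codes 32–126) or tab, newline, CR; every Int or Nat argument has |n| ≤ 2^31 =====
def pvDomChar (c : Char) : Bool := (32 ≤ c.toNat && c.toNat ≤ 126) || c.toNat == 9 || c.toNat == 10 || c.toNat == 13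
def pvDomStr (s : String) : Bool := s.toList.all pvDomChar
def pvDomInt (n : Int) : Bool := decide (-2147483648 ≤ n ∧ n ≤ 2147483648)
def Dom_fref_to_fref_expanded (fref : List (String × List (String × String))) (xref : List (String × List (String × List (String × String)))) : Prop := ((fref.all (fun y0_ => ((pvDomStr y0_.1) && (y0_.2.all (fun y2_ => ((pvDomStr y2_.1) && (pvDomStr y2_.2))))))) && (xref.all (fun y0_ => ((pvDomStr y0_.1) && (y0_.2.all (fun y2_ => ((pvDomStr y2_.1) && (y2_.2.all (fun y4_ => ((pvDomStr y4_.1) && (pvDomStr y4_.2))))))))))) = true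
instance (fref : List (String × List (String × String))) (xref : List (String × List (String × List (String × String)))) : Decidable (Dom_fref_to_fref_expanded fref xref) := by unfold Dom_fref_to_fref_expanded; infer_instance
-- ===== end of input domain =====

-- B computes a flat (col_exp, key_exp) pair list recursively, then builds both maps from it with dict(); A instead fills both dicts imperatively inside nested loops (alternative decomposition, same return value).


-- ===== PORT A =====
def fref_to_fref_expanded (fref : List (String × List (String × String))) (xref : List (String × List (String × List (String × String)))) : List (String × List (String × String)) :=
  let xrefD := PySem.Dict.ofList xref
  let fwd := PySem.Dict.ofList ((PySem.Dict.ofList fref).getD "forward" [])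
  -- fref['forward'] / xref[col]['forward'] use getD with default []; Pre_ excludes the KeyError inputs
  let res := fwd.items.foldl
    (fun (acc : PySem.Dict String String × PySem.Dict String String) ckv =>
      if xrefD.contains ckv.1 then
        ((PySem.Dict.ofList ((PySem.Dict.ofList (xrefD.getD ckv.1 [])).getD "forward" [])).items).foldl
          (fun acc2 catkv =>
            (acc2.1.insert (ckv.1 ++ "_" ++ catkv.1) (ckv.2 ++ "_" ++ catkv.2),
             acc2.2.insert (ckv.2 ++ "_" ++ catkv.2) (ckv.1 ++ "_" ++ catkv.1))) acc
      else
        (acc.1.insert ckv.1 ckv.2, acc.2.insert ckv.2 ckv.1))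
    (PySem.Dict.empty, PySem.Dict.empty)
  [("forward", res.1.items), ("reverse", res.2.items)]

-- ===== PORT B =====
-- B's recursive helper 'pairs': the flat association list of expanded (col_exp, key_exp) pairs
def pvPairsB (xrefD : PySem.Dict String (List (String × List (String × String)))) : List (String × String) → List (String × String)
  | [] => []
  | ckv :: rest =>
    (if xrefD.contains ckv.1 then
       ((PySem.Dict.ofList ((PySem.Dict.ofList (xrefD.getD ckv.1 [])).getD "forward" [])).items).map
         (fun catkv => (ckv.1 ++ "_" ++ catkv.1, ckv.2 ++ "_" ++ catkv.2))
     else [ckv]) ++ pvPairsB xrefD rest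

def fref_to_fref_expanded_alt (fref : List (String × List (String × String))) (xref : List (String × List (String × List (String × String)))) : List (String × List (String × String)) :=
  let ps := pvPairsB (PySem.Dict.ofList xref)
    (PySem.Dict.ofList ((PySem.Dict.ofList fref).getD "forward" [])).items
  [("forward", (PySem.Dict.ofList ps).items),
   ("reverse", (PySem.Dict.ofList (ps.map (fun p => (p.2, p.1)))).items)]

-- ===== PRECONDITION & SPEC =====
-- Pre_ excludes only the inputs on which A raises KeyError: fref missing the 'forward' key, or a
-- categorical column whose xref entry is missing its 'forward' key.
def Pre_fref_to_fref_expanded (fref : List (String × List (String × String))) (xref : List (String × List (String × List (String × String)))) : Prop :=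
  "forward" ∈ fref.map Prod.fst ∧
  (∀ p ∈ (PySem.Dict.ofList ((PySem.Dict.ofList fref).getD "forward" [])).items,
     (PySem.Dict.ofList xref).contains p.1 = true →
     "forward" ∈ ((PySem.Dict.ofList xref).getD p.1 []).map Prod.fst)
instance (fref : List (String × List (String × String))) (xref : List (String × List (String × List (String × String)))) : Decidable (Pre_fref_to_fref_expanded fref xref) := by unfold Pre_fref_to_fref_expanded; infer_instance

def pvWitness_fref_to_fref_expanded : (List (String × List (String × String))) × (List (String × List (String × List (String × String)))) :=
  ([("forward", [("a", "x"), ("b", "y")]), ("reverse", [])],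
   [("b", [("forward", [("u", "0"), ("v", "1")]), ("reverse", [])])])

def Spec_fref_to_fref_expanded (fref : List (String × List (String × String))) (xref : List (String × List (String × List (String × String)))) (out : List (String × List (String × String))) : Prop := out = fref_to_fref_expanded_alt fref xref
instance (fref : List (String × List (String × String))) (xref : List (String × List (String × List (String × String)))) (out : List (String × List (String × String))) : Decidable (Spec_fref_to_fref_expanded fref xref out) := by unfold Spec_fref_to_fref_expanded; infer_instance

-- ===== CLAIM (what is proved, stated in full; the proofs are below) =====
def Claim_equal_fref_to_fref_expanded : Prop := ∀ (fref : List (String × List (String × String))) (xref : List (String × List (String × List (String × String)))), Dom_fref_to_fref_expanded fref xref → Pre_fref_to_fref_expanded fref xref → Spec_fref_to_fref_expanded fref xref (fref_to_fref_expanded fref xref)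

-- ===== LEMMAS AND PROOFS =====

-- the expansion of one forward entry (proof-side description of both programs' per-column step)
def pvExp (xrefD : PySem.Dict String (List (String × List (String × String)))) (ckv : String × String) : List (String × String) :=
  if xrefD.contains ckv.1 then
    ((PySem.Dict.ofList ((PySem.Dict.ofList (xrefD.getD ckv.1 [])).getD "forward" [])).items).map
      (fun catkv => (ckv.1 ++ "_" ++ catkv.1, ckv.2 ++ "_" ++ catkv.2))
  else [ckv]

-- B's recursion computes the flatMap of the per-column expansions
theorem pvPairsB_eq_flatMap (xrefD : PySem.Dict String (List (String × List (String × String)))) (l : List (String × String)) :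
    pvPairsB xrefD l = l.flatMap (pvExp xrefD) := by
  induction l with
  | nil => rfl
  | cons x xs ih => simp [pvPairsB, pvExp, ih]

-- a fold that inserts into both components independently splits into two folds
theorem pv_foldl_prod_ins (a b : String) (l : List (String × String)) : ∀ (d1 d2 : PySem.Dict String String),
    l.foldl (fun acc p => (acc.1.insert (a ++ "_" ++ p.1) (b ++ "_" ++ p.2), acc.2.insert (b ++ "_" ++ p.2) (a ++ "_" ++ p.1))) (d1, d2)
    = (l.foldl (fun d p => d.insert (a ++ "_" ++ p.1) (b ++ "_" ++ p.2)) d1,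
       l.foldl (fun d p => d.insert (b ++ "_" ++ p.2) (a ++ "_" ++ p.1)) d2) := by
  induction l with
  | nil => intro d1 d2; rfl
  | cons x xs ih => intro d1 d2; simp [List.foldl, ih]

-- A's main loop splits into the two insertion folds over the flattened pair list
theorem pv_foldA (xrefD : PySem.Dict String (List (String × List (String × String)))) (l : List (String × String)) :
    ∀ (d1 d2 : PySem.Dict String String),
    l.foldl
      (fun (acc : PySem.Dict String String × PySem.Dict String String) ckv =>
        if xrefD.contains ckv.1 then
          ((PySem.Dict.ofList ((PySem.Dict.ofList (xrefD.getD ckv.1 [])).getD "forward" [])).items).foldl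
            (fun acc2 catkv =>
              (acc2.1.insert (ckv.1 ++ "_" ++ catkv.1) (ckv.2 ++ "_" ++ catkv.2),
               acc2.2.insert (ckv.2 ++ "_" ++ catkv.2) (ckv.1 ++ "_" ++ catkv.1))) acc
        else
          (acc.1.insert ckv.1 ckv.2, acc.2.insert ckv.2 ckv.1)) (d1, d2)
    = ((l.flatMap (pvExp xrefD)).foldl (fun d p => d.insert p.1 p.2) d1,
       (l.flatMap (pvExp xrefD)).foldl (fun d p => d.insert p.2 p.1) d2) := by
  induction l with
  | nil => intro d1 d2; rfl
  | cons x xs ih =>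
    intro d1 d2
    simp only [List.foldl_cons, List.flatMap_cons, List.foldl_append, pvExp]
    by_cases h : xrefD.contains x.1 = true
    · simp only [h, if_true]
      rw [pv_foldl_prod_ins x.1 x.2]
      simp only [List.foldl_map, ih]
    · simp only [Bool.not_eq_true] at h
      simp only [h, Bool.false_eq_true, if_false, ih, List.foldl_cons, List.foldl_nil]

-- dict(ps) is the insertion fold over ps (PySem.Dict.ofList is definitionally that fold)
theorem pv_ofList_eq_foldl (l : List (String × String)) :
    PySem.Dict.ofList l = l.foldl (fun d p => d.insert p.1 p.2) PySem.Dict.empty := rfl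

-- ===== VERDICT (by name: the statement is the Claim_ definition above) =====
theorem fref_to_fref_expanded_spec : Claim_equal_fref_to_fref_expanded := by
  intro fref xref _ _
  unfold Spec_fref_to_fref_expanded fref_to_fref_expanded fref_to_fref_expanded_alt
  simp only [pvPairsB_eq_flatMap]
  rw [pv_foldA]
  simp only [pv_ofList_eq_foldl, List.foldl_map]
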